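-- pv_equiv track=rewrite | github.com/vaskee223/Find-common-free-time | mainv2.py | find_free_times
-- ===== SOURCE A (Python) =====
-- MINUTES_PER_SEGMENT = 15
--
-- SEGMENTS_PER_HOUR = 4
--
-- def index_to_time(index: int, start: int):
--     hour = int(index / SEGMENTS_PER_HOUR) + start
--     minute = (index % SEGMENTS_PER_HOUR) * MINUTES_PER_SEGMENT
--     return f"{hour:02}:{minute:02}"
--
-- def find_free_times(schedule, schedule_start):
--     start = None
--     end = None
--     found = []
--     for i in range(0, len(schedule)):
--         if(schedule[i]==1 and start is None):
--             start = i
--             end = i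
--         elif(schedule[i]==1 and start is not None):
--             end = i
--         if((schedule[i]==0 or i==len(schedule)-1) and start is not None):
--             find = index_to_time(start, schedule_start) + "-" + index_to_time(end + 1, schedule_start)
--             found.append(find)
--             start = None
--             end = None
--     return found
-- ===== SOURCE B (Python) =====
-- MINUTES_PER_SEGMENT = 15
--
-- SEGMENTS_PER_HOUR = 4
--
-- def index_to_time(index: int, start: int):
--     hour = int(index / SEGMENTS_PER_HOUR) + start
--     minute = (index % SEGMENTS_PER_HOUR) * MINUTES_PER_SEGMENT
--     return f"{hour:02}:{minute:02}"
--
-- def find_free_times(schedule, schedule_start):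
--     # Phase 1: split the schedule into its maximal zero-free blocks of (index, value) pairs.
--     blocks = []
--     cur = []
--     for i, v in enumerate(schedule):
--         if v == 0:
--             if cur:
--                 blocks.append(cur)
--                 cur = []
--         else:
--             cur.append((i, v))
--     if cur:
--         blocks.append(cur)
--     # Phase 2: each block containing a 1 yields a range from its first 1 to just past its last 1.
--     found = []
--     for blk in blocks:
--         ones = [i for i, v in blk if v == 1]
--         if ones:
--             found.append(index_to_time(ones[0], schedule_start) + "-" + index_to_time(ones[-1] + 1, schedule_start))
--     return found
-- ===== Notes on version B (the rewrite author's own statement) =====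
-- stated objective: alternative
-- what changed: Replaces A's single pass with running start/end pointers and an in-loop last-index flush by a two-phase decomposition: first split the schedule into maximal zero-free blocks of (index, value) pairs, then emit one range per block from its first 1 to just past its last 1.
import Mathlib
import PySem

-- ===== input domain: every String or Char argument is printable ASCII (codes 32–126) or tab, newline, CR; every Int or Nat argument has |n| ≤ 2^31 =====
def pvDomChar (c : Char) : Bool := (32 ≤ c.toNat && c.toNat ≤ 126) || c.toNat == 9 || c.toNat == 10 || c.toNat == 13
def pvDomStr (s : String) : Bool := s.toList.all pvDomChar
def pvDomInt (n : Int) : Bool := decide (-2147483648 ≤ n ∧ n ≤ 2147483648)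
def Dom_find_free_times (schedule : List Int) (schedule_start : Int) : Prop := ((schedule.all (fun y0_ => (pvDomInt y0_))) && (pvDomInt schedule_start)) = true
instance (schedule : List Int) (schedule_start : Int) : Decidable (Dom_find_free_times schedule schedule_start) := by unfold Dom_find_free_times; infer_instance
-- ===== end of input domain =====

-- B re-implements A as two phases (split into zero-free blocks, then emit one range per block
-- containing a 1) instead of A's running start/end pointers; objective: alternative decomposition.

-- ===== PORT A =====
-- f"{n:02}": str(n) zero-padded on the left to width 2 (sign counts toward the width)
def pad2 (n : Int) : String :=
  let s := PySem.Int.toStr n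
  if PySem.Str.len s < 2 then "0" ++ s else s

-- shared module helper index_to_time; int(index / 4) is exact for the list indices it receives
def index_to_time (index : Int) (start : Int) : String :=
  let hour := PySem.Int.truncdiv index 4 + start
  let minute := PySem.Int.mod index 4 * 15
  pad2 hour ++ ":" ++ pad2 minute

-- body of A's for-loop (state: start, end, found); `for i in range(0, len)` with `schedule[i]`
-- is ported as a fold over enumerate, which yields exactly the same (i, schedule[i]) pairs
def stepA (s n : Int) (acc : Option Int × Option Int × List String) (p : Int × Int) :
    Option Int × Option Int × List String :=
  let st :=
    if p.2 == 1 && acc.1.isNone then (some p.1, some p.1)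
    else if p.2 == 1 && !acc.1.isNone then (acc.1, some p.1)
    else (acc.1, acc.2.1)
  if (p.2 == 0 || p.1 == n - 1) && st.1.isSome then
    (none, none,
      acc.2.2 ++ [index_to_time (st.1.getD 0) s ++ "-" ++ index_to_time (st.2.getD 0 + 1) s])
  else (st.1, st.2, acc.2.2)

def find_free_times (schedule : List Int) (schedule_start : Int) : List String :=
  let n : Int := schedule.length
  ((PySem.List.enumerate schedule 0).foldl (stepA schedule_start n) (none, none, [])).2.2

-- ===== PORT B =====
-- phase-1 loop body: close the current block at a 0, otherwise extend it
def stepB (acc : List (List (Int × Int)) × List (Int × Int)) (p : Int × Int) :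
    List (List (Int × Int)) × List (Int × Int) :=
  if p.2 == 0 then (if acc.2.isEmpty then acc else (acc.1 ++ [acc.2], []))
  else (acc.1, acc.2 ++ [p])

-- [i for i, v in blk if v == 1]
def onesOf (blk : List (Int × Int)) : List Int :=
  (blk.filter (fun q => q.2 == 1)).map (fun q => q.1)

-- phase-2 loop body
def emitBlock (s : Int) (found : List String) (blk : List (Int × Int)) : List String :=
  let ones := onesOf blk
  if ones.isEmpty then found
  else found ++ [index_to_time (ones.headD 0) s ++ "-" ++ index_to_time (ones.getLastD 0 + 1) s]

def find_free_times_alt (schedule : List Int) (schedule_start : Int) : List String :=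
  let acc := (PySem.List.enumerate schedule 0).foldl stepB ([], [])
  let blocks := if acc.2.isEmpty then acc.1 else acc.1 ++ [acc.2]
  blocks.foldl (emitBlock schedule_start) []

-- ===== PRECONDITION & SPEC =====
def Spec_find_free_times (schedule : List Int) (schedule_start : Int) (out : List String) : Prop := out = find_free_times_alt schedule schedule_start
instance (schedule : List Int) (schedule_start : Int) (out : List String) : Decidable (Spec_find_free_times schedule schedule_start out) := by unfold Spec_find_free_times; infer_instance

-- ===== CLAIM (what is proved, stated in full; the proofs are below) =====
def Claim_equal_find_free_times : Prop := ∀ (schedule : List Int) (schedule_start : Int), Dom_find_free_times schedule schedule_start → Spec_find_free_times schedule schedule_start (find_free_times schedule schedule_start)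

-- ===== LEMMAS AND PROOFS =====

lemma onesOf_append (cur : List (Int × Int)) (p : Int × Int) :
    onesOf (cur ++ [p]) = onesOf cur ++ (if p.2 == 1 then [p.1] else []) := by
  simp only [onesOf, List.filter_append, List.map_append]
  by_cases h : p.2 == 1 <;> simp [h]

lemma foldl_emit_append (s : Int) (blocks : List (List (Int × Int))) (cur : List (Int × Int)) :
    (blocks ++ [cur]).foldl (emitBlock s) [] = emitBlock s (blocks.foldl (emitBlock s) []) cur := by
  simp [List.foldl_append]

-- main loop invariant: A's (start, end, found) corresponds to B's (blocks, cur) via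
-- start/end = first/last index of a 1 in cur, found = phase 2 applied to blocks
lemma main (s n : Int) : ∀ (rest : List Int) (x k : Int)
    (st e : Option Int) (found : List String)
    (blocks : List (List (Int × Int))) (cur : List (Int × Int)),
    k + 1 + rest.length = n →
    st = (onesOf cur).head? → e = (onesOf cur).getLast? →
    found = blocks.foldl (emitBlock s) [] →
    ((PySem.List.enumerate (x :: rest) k).foldl (stepA s n) (st, e, found)).2.2
      = (let acc := (PySem.List.enumerate (x :: rest) k).foldl stepB (blocks, cur)
         (if acc.2.isEmpty then acc.1 else acc.1 ++ [acc.2]).foldl (emitBlock s) []) := by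
  intro rest
  induction rest with
  | nil =>
    intro x k st e found blocks cur hk hst he hf
    have hk' : k = n - 1 := by simp at hk; omega
    subst hst he hf
    simp only [PySem.List.enumerate_cons, PySem.List.enumerate_nil, List.foldl_cons, List.foldl_nil]
    subst hk'
    simp only [stepA, stepB]
    by_cases h1 : x == 1
    · have hx : x = 1 := by simpa using h1
      subst hx
      rcases hl : onesOf cur with _ | ⟨a, l⟩
      · simp [hl, emitBlock, onesOf_append]
      · simp [hl, emitBlock, onesOf_append]
        rw [show a :: (l ++ [n - 1]) = (a :: l) ++ [n - 1] from rfl, List.getLast?_concat]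
        norm_num
    · by_cases h0 : x == 0
      · have hx : x = 0 := by simpa using h0
        subst hx
        rcases cur with _ | ⟨c, cur'⟩
        · simp [onesOf]
        · rcases hl : onesOf (c :: cur') with _ | ⟨a, l⟩
          · simp [hl, h1, emitBlock]
          · simp [hl, h1, emitBlock]
      · rcases hl : onesOf cur with _ | ⟨a, l⟩
        · simp [h1, h0, hl, emitBlock, onesOf_append]
        · simp [h1, h0, hl, emitBlock, onesOf_append]
  | cons y rest ih =>
    intro x k st e found blocks cur hk hst he hf
    have hklen : (k + 1) + 1 + (rest.length : Int) = n := by simp at hk ⊢; omega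
    have hne : (k == n - 1) = false := by
      have hkk : k ≠ n - 1 := by simp at hk; omega
      simpa using hkk
    subst hst he hf
    rw [PySem.List.enumerate_cons, List.foldl_cons, List.foldl_cons]
    by_cases h1 : x == 1
    · have hx : x = 1 := by simpa using h1
      subst hx
      rcases hl : onesOf cur with _ | ⟨a, l⟩
      · rw [show stepA s n (([] : List Int).head?, ([] : List Int).getLast?, List.foldl (emitBlock s) [] blocks) (k, 1)
              = (some k, some k, List.foldl (emitBlock s) [] blocks) from by simp [stepA, hne],
            show stepB (blocks, cur) (k, 1) = (blocks, cur ++ [(k, 1)]) from by simp [stepB]]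
        exact ih y (k + 1) _ _ _ _ _ hklen (by simp [onesOf_append, hl])
          (by simp [onesOf_append, hl]) rfl
      · rw [show stepA s n ((a :: l).head?, (a :: l).getLast?, List.foldl (emitBlock s) [] blocks) (k, 1)
              = (some a, some k, List.foldl (emitBlock s) [] blocks) from by simp [stepA, hne],
            show stepB (blocks, cur) (k, 1) = (blocks, cur ++ [(k, 1)]) from by simp [stepB]]
        refine ih y (k + 1) _ _ _ _ _ hklen (by simp [onesOf_append, hl]) ?_ rfl
        rw [onesOf_append, hl]
        simp only [beq_self_eq_true, if_pos]
        rw [show a :: l ++ [(k, (1 : Int)).1] = (a :: l) ++ [k] from rfl, List.getLast?_concat]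
    · by_cases h0 : x == 0
      · have hx : x = 0 := by simpa using h0
        subst hx
        rcases cur with _ | ⟨c, cur'⟩
        · rw [show stepA s n ((onesOf ([] : List (Int × Int))).head?, (onesOf ([] : List (Int × Int))).getLast?, List.foldl (emitBlock s) [] blocks) (k, 0)
                = (none, none, List.foldl (emitBlock s) [] blocks) from by simp [stepA, onesOf],
              show stepB (blocks, []) (k, 0) = (blocks, []) from by simp [stepB]]
          exact ih y (k + 1) _ _ _ _ _ hklen (by simp [onesOf]) (by simp [onesOf]) rfl
        · rcases hl : onesOf (c :: cur') with _ | ⟨a, l⟩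
          · rw [show stepA s n (([] : List Int).head?, ([] : List Int).getLast?, List.foldl (emitBlock s) [] blocks) (k, 0)
                  = (none, none, List.foldl (emitBlock s) [] blocks) from by simp [stepA],
                show stepB (blocks, c :: cur') (k, 0) = (blocks ++ [c :: cur'], []) from by simp [stepB]]
            exact ih y (k + 1) _ _ _ _ _ hklen (by simp [onesOf]) (by simp [onesOf])
              (by rw [foldl_emit_append]; simp [emitBlock, hl])
          · rw [show stepA s n ((a :: l).head?, (a :: l).getLast?, List.foldl (emitBlock s) [] blocks) (k, 0)
                  = (none, none, emitBlock s (List.foldl (emitBlock s) [] blocks) (c :: cur')) from by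
                    simp [stepA, emitBlock, hl],
                show stepB (blocks, c :: cur') (k, 0) = (blocks ++ [c :: cur'], []) from by simp [stepB]]
            exact ih y (k + 1) _ _ _ _ _ hklen (by simp [onesOf]) (by simp [onesOf])
              (by rw [foldl_emit_append])
      · rw [show stepA s n ((onesOf cur).head?, (onesOf cur).getLast?, List.foldl (emitBlock s) [] blocks) (k, x)
              = ((onesOf cur).head?, (onesOf cur).getLast?, List.foldl (emitBlock s) [] blocks) from by
                simp [stepA, h1, h0, hne],
            show stepB (blocks, cur) (k, x) = (blocks, cur ++ [(k, x)]) from by simp [stepB, h0]]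
        exact ih y (k + 1) _ _ _ _ _ hklen (by simp [onesOf_append, h1])
          (by simp [onesOf_append, h1]) rfl

-- ===== VERDICT (by name: the statement is the Claim_ definition above) =====
theorem find_free_times_spec : Claim_equal_find_free_times := by
  intro schedule schedule_start _
  unfold Spec_find_free_times find_free_times find_free_times_alt
  cases schedule with
  | nil => simp [PySem.List.enumerate]
  | cons x rest =>
      have h := main schedule_start (x :: rest).length rest x 0 none none [] [] []
        (by simp; omega) (by simp [onesOf]) (by simp [onesOf]) (by simp)
      simpa using h
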